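-- pv_equiv track=rewrite | github.com/stanpo57/Euro2024_bot | app/euro2024.py | finalists_from_group
-- ===== SOURCE A (Python) =====
-- def finalists_from_group(groups_itog):   # выбока участников финального турнира из групп
--     finalists_gr = {}
--     finalists_3 = {}
--
--     for i in range(0, len(groups_itog) - 1, 4):
--         if groups_itog[i][1][1]+groups_itog[i + 1][1][1]+groups_itog[i + 2][1][1]+groups_itog[i + 3][1][1]==12:
--             key1 = f"1{chr(groups_itog[i][1][0] + 64)}"
--             key2 = f"2{chr(groups_itog[i][1][0] + 64)}"
--             key3 = groups_itog[i + 2][0]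
--             finalists_gr[key1] = groups_itog[i][0]
--             finalists_gr[key2] = groups_itog[i + 1][0]
--             finalists_3[key3] = groups_itog[i + 2][1]
--
--         if len(finalists_3) == 6:
--             for k, v in finalists_3.items():
--                 v[9] = v[7]*1000000 + (v[5]-v[6]+20)*10000 + v[5]*100
--                 finalists_3_sorted = sorted(finalists_3.items(), key=lambda item: item[1][9], reverse=True)
--                 finalists_gr['3A/B/C/D'] = finalists_3_sorted[0][0]
--                 finalists_gr['3A/D/E/F'] = finalists_3_sorted[1][0]
--                 finalists_gr['3D/E/F'] = finalists_3_sorted[2][0]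
--                 finalists_gr['3A/B/C'] = finalists_3_sorted[3][0]
--
--     return finalists_gr
-- ===== SOURCE B (Python) =====
-- def finalists_from_group(groups_itog):
--     # Consumes the standings four tuples at a time from the front (while-loop on the
--     # remaining suffix instead of an index range); at each point where the third-place
--     # dict holds 6 teams, scores are written in one pass and the four advancing
--     # third-place teams are picked by repeated first-maximum SELECTION (no sorting).
--     # Like A, this mutates each third-place list at index 9.
--     finalists_gr = {}
--     finalists_3 = {}
--     rest = groups_itog
--     while len(rest) >= 4:
--         (w, x, y, z), rest = rest[:4], rest[4:]
--         if w[1][1] + x[1][1] + y[1][1] + z[1][1] == 12: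
--             g = chr(w[1][0] + 64)
--             finalists_gr["1" + g] = w[0]
--             finalists_gr["2" + g] = x[0]
--             finalists_3[y[0]] = y[1]
--         if len(finalists_3) == 6:
--             for v in finalists_3.values():
--                 v[9] = v[7] * 1000000 + (v[5] - v[6] + 20) * 10000 + v[5] * 100
--             pool = [(k, v[9]) for k, v in finalists_3.items()]
--             picks = []
--             for _ in range(4):
--                 best = 0
--                 for j in range(1, len(pool)):
--                     if pool[j][1] > pool[best][1]:
--                         best = j
--                 picks.append(pool.pop(best)[0])
--             (finalists_gr['3A/B/C/D'], finalists_gr['3A/D/E/F'],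
--              finalists_gr['3D/E/F'], finalists_gr['3A/B/C']) = picks
--     return finalists_gr
-- ===== Notes on version B (the rewrite author's own statement) =====
-- stated objective: alternative
-- what changed: B walks the standings by slicing four tuples at a time off the remaining suffix (while-loop on the rest) instead of indexing a stride-4 range, and replaces A's sort-based ranking (which re-sorts the whole third-place dict once per team inside a redundant nested loop) with a sort-free selection: one score pass, then four rounds of scan-for-first-maximum-and-pop over a (name, score) pool.
import Mathlib
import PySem

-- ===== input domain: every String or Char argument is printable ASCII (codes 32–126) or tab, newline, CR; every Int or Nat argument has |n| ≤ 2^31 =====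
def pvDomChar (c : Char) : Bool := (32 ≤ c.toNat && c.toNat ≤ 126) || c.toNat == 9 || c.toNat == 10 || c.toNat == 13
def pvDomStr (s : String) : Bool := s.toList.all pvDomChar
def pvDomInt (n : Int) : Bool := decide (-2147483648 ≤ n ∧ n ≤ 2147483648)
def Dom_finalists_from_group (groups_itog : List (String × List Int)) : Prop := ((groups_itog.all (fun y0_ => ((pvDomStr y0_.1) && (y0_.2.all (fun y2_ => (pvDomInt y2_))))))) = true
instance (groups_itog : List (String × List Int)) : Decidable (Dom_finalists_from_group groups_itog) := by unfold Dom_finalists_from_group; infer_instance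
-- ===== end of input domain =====

-- B consumes the standings four tuples at a time off the remaining suffix and picks the
-- four advancing third-place teams by repeated first-maximum selection (no sorting),
-- after one score-update pass, instead of A's per-item re-sort-and-reassign loop
-- (objective: alternative). Like A, B mutates each third-place list at index 9; the
-- equivalence proved here is about the return value (the mutations are the same in both).


-- ===== PORT A =====
def finalists_from_group (groups_itog : List (String × List Int)) : List (String × String) :=
  let res := (PySem.List.pyRange 0 (PySem.List.len groups_itog - 1) 4).foldl
    (fun (st : PySem.Dict String String × PySem.Dict String (List Int)) i =>
      let p0 := PySem.List.pyGetD groups_itog i ("", [])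
      let p1 := PySem.List.pyGetD groups_itog (i + 1) ("", [])
      let p2 := PySem.List.pyGetD groups_itog (i + 2) ("", [])
      let p3 := PySem.List.pyGetD groups_itog (i + 3) ("", [])
      let st1 :=
        if PySem.List.pyGetD p0.2 1 0 + PySem.List.pyGetD p1.2 1 0 + PySem.List.pyGetD p2.2 1 0 + PySem.List.pyGetD p3.2 1 0 = 12 then
          -- chr(x + 64): exact for valid non-surrogate scalars (guaranteed by Pre_)
          let c := Char.ofNat (PySem.List.pyGetD p0.2 0 0 + 64).toNat
          ((st.1.insert (String.ofList ['1', c]) p0.1).insert (String.ofList ['2', c]) p1.1,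
           st.2.insert p2.1 p2.2)
        else st
      if st1.2.size = 6 then
        -- for k, v in finalists_3.items(): v[9] = …; re-sort; re-assign the four slots
        st1.2.items.foldl
          (fun (st2 : PySem.Dict String String × PySem.Dict String (List Int)) kv =>
            let v' := PySem.List.pySetD kv.2 9
              (PySem.List.pyGetD kv.2 7 0 * 1000000 + (PySem.List.pyGetD kv.2 5 0 - PySem.List.pyGetD kv.2 6 0 + 20) * 10000 + PySem.List.pyGetD kv.2 5 0 * 100)
            let f3' := st2.2.insert kv.1 v'
            let srt := PySem.List.sorted f3'.items (fun it => PySem.List.pyGetD it.2 9 0) true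
            ((((st2.1.insert "3A/B/C/D" (PySem.List.pyGetD srt 0 ("", [])).1).insert "3A/D/E/F" (PySem.List.pyGetD srt 1 ("", [])).1).insert "3D/E/F" (PySem.List.pyGetD srt 2 ("", [])).1).insert "3A/B/C" (PySem.List.pyGetD srt 3 ("", [])).1,
             f3'))
          st1
      else st1)
    (PySem.Dict.empty, PySem.Dict.empty)
  res.1.items

-- ===== PORT B =====
-- one score-update pass: for v in finalists_3.values(): v[9] = v[7]*1000000 + (v[5]-v[6]+20)*10000 + v[5]*100
def pvUpd (d : PySem.Dict String (List Int)) (kv : String × List Int) : PySem.Dict String (List Int) :=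
  d.insert kv.1 (PySem.List.pySetD kv.2 9
    (PySem.List.pyGetD kv.2 7 0 * 1000000 + (PySem.List.pyGetD kv.2 5 0 - PySem.List.pyGetD kv.2 6 0 + 20) * 10000 + PySem.List.pyGetD kv.2 5 0 * 100))

-- best = 0; for j in range(1, len(pool)): if pool[j][1] > pool[best][1]: best = j
def pvBest (pool : List (String × Int)) : Int :=
  (PySem.List.pyRange 1 (PySem.List.len pool)).foldl
    (fun best j => if (PySem.List.pyGetD pool j ("", 0)).2 > (PySem.List.pyGetD pool best ("", 0)).2 then j else best) 0

-- for _ in range(4): …; picks.append(pool.pop(best)[0])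
def pvSelect : Nat → List (String × Int) → List String
  | 0, _ => []
  | n + 1, pool =>
    match PySem.List.pop? pool (pvBest pool) with
    | some (p, pool') => p.1 :: pvSelect n pool'
    | none => []

-- the 'if len(finalists_3) == 6' block of Source B
def pvFire (st1 : PySem.Dict String String × PySem.Dict String (List Int)) :
    PySem.Dict String String × PySem.Dict String (List Int) :=
  if st1.2.size = 6 then
    let f3u := st1.2.items.foldl pvUpd st1.2
    let picks := pvSelect 4 (f3u.items.map (fun kv => (kv.1, PySem.List.pyGetD kv.2 9 0)))
    (((((st1.1.insert "3A/B/C/D" (PySem.List.pyGetD picks 0 "")).insert "3A/D/E/F" (PySem.List.pyGetD picks 1 "")).insert "3D/E/F" (PySem.List.pyGetD picks 2 "")).insert "3A/B/C" (PySem.List.pyGetD picks 3 "")), f3u)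
  else st1

-- while len(rest) >= 4: (w, x, y, z), rest = rest[:4], rest[4:]; …
def pvGoB (st : PySem.Dict String String × PySem.Dict String (List Int)) :
    List (String × List Int) → PySem.Dict String String × PySem.Dict String (List Int)
  | w :: x :: y :: z :: rest =>
    pvGoB
      (pvFire
        (if PySem.List.pyGetD w.2 1 0 + PySem.List.pyGetD x.2 1 0 + PySem.List.pyGetD y.2 1 0 + PySem.List.pyGetD z.2 1 0 = 12 then
          let g := Char.ofNat (PySem.List.pyGetD w.2 0 0 + 64).toNat
          ((st.1.insert (String.ofList ['1', g]) w.1).insert (String.ofList ['2', g]) x.1,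
           st.2.insert y.1 y.2)
        else st))
      rest
  | _ => st

def finalists_from_group_alt (groups_itog : List (String × List Int)) : List (String × String) :=
  (pvGoB (PySem.Dict.empty, PySem.Dict.empty) groups_itog).1.items

-- ===== PRECONDITION & SPEC =====
-- second-row sum of the block starting at tuple 4*j (the '== 12' test A applies to each block)
def pvRow2Sum (groups_itog : List (String × List Int)) (j : Nat) : Int :=
  (groups_itog.getD (4 * j) ("", [])).2.getD 1 0 + (groups_itog.getD (4 * j + 1) ("", [])).2.getD 1 0 +
  (groups_itog.getD (4 * j + 2) ("", [])).2.getD 1 0 + (groups_itog.getD (4 * j + 3) ("", [])).2.getD 1 0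
-- third-place name of block j
def pvThirdKey (groups_itog : List (String × List Int)) (j : Nat) : String :=
  (groups_itog.getD (4 * j + 2) ("", [])).1
-- number of distinct third-place names over the sum-12 blocks up to and including block j
def pvKeyCountUpTo (groups_itog : List (String × List Int)) (j : Nat) : Nat :=
  (PySem.Set.ofList (((List.range (j + 1)).filter
      (fun m => pvRow2Sum groups_itog m == 12)).map (pvThirdKey groups_itog))).length
-- Pre_ excludes exactly the inputs where the Python raises (a length ≡ 2 or 3 mod 4 → IndexError on
-- groups_itog[i+3]; an inner list shorter than 2 in a block → IndexError on [1][1]; a chr argument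
-- outside range(0x110000) in a sum-12 block → ValueError; a third-place list shorter than 10 that is
-- still the current value of its name at a block end where the third-place dict has exactly 6 keys
-- → IndexError on v[9]), plus one stated narrowing: chr arguments landing on surrogate code points
-- are excluded although Python returns there (a lone-surrogate string Lean's Char cannot represent).
-- every block's four inner lists are long enough for [1][1] and, on sum-12 blocks, chr is in range
def pvBlocksOk (groups_itog : List (String × List Int)) : Bool :=
  (List.range groups_itog.length).all (fun j =>
    if 4 * j + 3 < groups_itog.length then
      (decide (2 ≤ (groups_itog.getD (4 * j) ("", [])).2.length) &&
       decide (2 ≤ (groups_itog.getD (4 * j + 1) ("", [])).2.length) &&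
       decide (2 ≤ (groups_itog.getD (4 * j + 2) ("", [])).2.length) &&
       decide (2 ≤ (groups_itog.getD (4 * j + 3) ("", [])).2.length)) &&
      (if pvRow2Sum groups_itog j == 12 then
        (decide (0 ≤ (groups_itog.getD (4 * j) ("", [])).2.getD 0 0 + 64) &&
         decide ((groups_itog.getD (4 * j) ("", [])).2.getD 0 0 + 64 < 55296)) ||
        (decide (57344 ≤ (groups_itog.getD (4 * j) ("", [])).2.getD 0 0 + 64) &&
         decide ((groups_itog.getD (4 * j) ("", [])).2.getD 0 0 + 64 < 1114112))
      else true)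
    else true)
-- block m is the last sum-12 occurrence of its third-place name among blocks up to j
def pvLastOcc (groups_itog : List (String × List Int)) (j m : Nat) : Bool :=
  (List.range (j + 1)).all (fun m' =>
    if decide (m < m') && (pvRow2Sum groups_itog m' == 12) then
      pvThirdKey groups_itog m' != pvThirdKey groups_itog m
    else true)
-- at block end j: each name's current (= last-assigned) third-place list has at least 10 entries
def pvSixAt (groups_itog : List (String × List Int)) (j : Nat) : Bool :=
  (List.range (j + 1)).all (fun m =>
    if (pvRow2Sum groups_itog m == 12) && pvLastOcc groups_itog j m then
      decide (10 ≤ (groups_itog.getD (4 * m + 2) ("", [])).2.length)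
    else true)
-- at every block end where the third-place dict has exactly 6 names, v[9] exists for all its values
def pvSixOk (groups_itog : List (String × List Int)) : Bool :=
  (List.range groups_itog.length).all (fun j =>
    if decide (4 * j + 3 < groups_itog.length) && (pvKeyCountUpTo groups_itog j == 6) then
      pvSixAt groups_itog j
    else true)
def Pre_finalists_from_group (groups_itog : List (String × List Int)) : Prop :=
  groups_itog.length % 4 ≤ 1 ∧ pvBlocksOk groups_itog = true ∧ pvSixOk groups_itog = true
instance (groups_itog : List (String × List Int)) : Decidable (Pre_finalists_from_group groups_itog) := by
  unfold Pre_finalists_from_group; infer_instance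

def pvWitness_finalists_from_group : (List (String × List Int)) :=
  [("T1", [1, 3, 0, 0, 0, 0, 0, 0, 0, 0]), ("T2", [1, 3, 0, 0, 0, 0, 0, 0, 0, 0]),
   ("T3", [1, 3, 0, 0, 0, 0, 0, 0, 0, 0]), ("T4", [1, 3, 0, 0, 0, 0, 0, 0, 0, 0])]

def Spec_finalists_from_group (groups_itog : List (String × List Int)) (out : List (String × String)) : Prop := out = finalists_from_group_alt groups_itog
instance (groups_itog : List (String × List Int)) (out : List (String × String)) : Decidable (Spec_finalists_from_group groups_itog out) := by unfold Spec_finalists_from_group; infer_instance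

-- ===== CLAIM (what is proved, stated in full; the proofs are below) =====
def Claim_equal_finalists_from_group : Prop := ∀ (groups_itog : List (String × List Int)), Dom_finalists_from_group groups_itog → Pre_finalists_from_group groups_itog → Spec_finalists_from_group groups_itog (finalists_from_group groups_itog)

-- ===== LEMMAS AND PROOFS =====

-- proof-side names for A's loop body and sort-and-assign block (definitionally equal to A's lambdas)
def pvRank4 (gr : PySem.Dict String String) (f3 : PySem.Dict String (List Int)) : PySem.Dict String String :=
  let srt := PySem.List.sorted f3.items (fun it => PySem.List.pyGetD it.2 9 0) true
  (((gr.insert "3A/B/C/D" (PySem.List.pyGetD srt 0 ("", [])).1).insert "3A/D/E/F" (PySem.List.pyGetD srt 1 ("", [])).1).insert "3D/E/F" (PySem.List.pyGetD srt 2 ("", [])).1).insert "3A/B/C" (PySem.List.pyGetD srt 3 ("", [])).1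

def pvBodyA (g : List (String × List Int))
    (st : PySem.Dict String String × PySem.Dict String (List Int)) (i : Int) :
    PySem.Dict String String × PySem.Dict String (List Int) :=
  let p0 := PySem.List.pyGetD g i ("", [])
  let p1 := PySem.List.pyGetD g (i + 1) ("", [])
  let p2 := PySem.List.pyGetD g (i + 2) ("", [])
  let p3 := PySem.List.pyGetD g (i + 3) ("", [])
  let st1 :=
    if PySem.List.pyGetD p0.2 1 0 + PySem.List.pyGetD p1.2 1 0 + PySem.List.pyGetD p2.2 1 0 + PySem.List.pyGetD p3.2 1 0 = 12 then
      let c := Char.ofNat (PySem.List.pyGetD p0.2 0 0 + 64).toNat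
      ((st.1.insert (String.ofList ['1', c]) p0.1).insert (String.ofList ['2', c]) p1.1,
       st.2.insert p2.1 p2.2)
    else st
  if st1.2.size = 6 then
    st1.2.items.foldl (fun st2 kv => (pvRank4 st2.1 (pvUpd st2.2 kv), pvUpd st2.2 kv)) st1
  else st1

-- two inserts at different keys commute when the first key is already present
lemma pv_insert_comm {ν : Type} (d : PySem.Dict String ν) (k1 k2 : String) (v1 v2 : ν)
    (hne : k1 ≠ k2) (h : d.contains k1 = true) :
    (d.insert k1 v1).insert k2 v2 = (d.insert k2 v2).insert k1 v1 := by
  apply PySem.Dict.ext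
  by_cases h2 : d.contains k2 = true
  · rw [PySem.Dict.items_insert_of_contains _ _ (show (d.insert k1 v1).contains k2 = true by simp [PySem.Dict.contains_insert, h2]),
        PySem.Dict.items_insert_of_contains _ _ h,
        PySem.Dict.items_insert_of_contains _ _ (show (d.insert k2 v2).contains k1 = true by simp [PySem.Dict.contains_insert, h]),
        PySem.Dict.items_insert_of_contains _ _ h2,
        List.map_map, List.map_map]
    apply List.map_congr_left
    intro p _
    simp only [Function.comp_apply]
    by_cases e1 : p.1 = k1
    · simp [e1, hne]
    · by_cases e2 : p.1 = k2 <;> simp [e1, e2, Ne.symm hne]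
  · replace h2 : d.contains k2 = false := by simpa using h2
    rw [PySem.Dict.items_insert_of_not_contains _ _ (show (d.insert k1 v1).contains k2 = false by simp [PySem.Dict.contains_insert, h2, Ne.symm hne]),
        PySem.Dict.items_insert_of_contains _ _ h,
        PySem.Dict.items_insert_of_contains _ _ (show (d.insert k2 v2).contains k1 = true by simp [PySem.Dict.contains_insert, h]),
        PySem.Dict.items_insert_of_not_contains _ _ h2,
        List.map_append]
    simp [Ne.symm hne]

lemma pv_abs4 (gr : PySem.Dict String String) (a b c d a' b' c' d' : String) :
    ((((((((gr.insert "3A/B/C/D" a).insert "3A/D/E/F" b).insert "3D/E/F" c).insert "3A/B/C" d).insert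
        "3A/B/C/D" a').insert "3A/D/E/F" b').insert "3D/E/F" c').insert "3A/B/C" d')
    = (((gr.insert "3A/B/C/D" a').insert "3A/D/E/F" b').insert "3D/E/F" c').insert "3A/B/C" d' := by
  rw [← pv_insert_comm (((gr.insert "3A/B/C/D" a).insert "3A/D/E/F" b).insert "3D/E/F" c)
        "3A/B/C/D" "3A/B/C" a' d (by decide) (by simp [PySem.Dict.contains_insert]),
      ← pv_insert_comm ((gr.insert "3A/B/C/D" a).insert "3A/D/E/F" b)
        "3A/B/C/D" "3D/E/F" a' c (by decide) (by simp [PySem.Dict.contains_insert]),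
      ← pv_insert_comm (gr.insert "3A/B/C/D" a)
        "3A/B/C/D" "3A/D/E/F" a' b (by decide) (by simp),
      PySem.Dict.insert_insert_self,
      ← pv_insert_comm (((gr.insert "3A/B/C/D" a').insert "3A/D/E/F" b).insert "3D/E/F" c)
        "3A/D/E/F" "3A/B/C" b' d (by decide) (by simp [PySem.Dict.contains_insert]),
      ← pv_insert_comm ((gr.insert "3A/B/C/D" a').insert "3A/D/E/F" b)
        "3A/D/E/F" "3D/E/F" b' c (by decide) (by simp),
      PySem.Dict.insert_insert_self,
      ← pv_insert_comm (((gr.insert "3A/B/C/D" a').insert "3A/D/E/F" b').insert "3D/E/F" c)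
        "3D/E/F" "3A/B/C" c' d (by decide) (by simp),
      PySem.Dict.insert_insert_self,
      PySem.Dict.insert_insert_self]

lemma pv_rank4_rank4 (gr : PySem.Dict String String) (f f' : PySem.Dict String (List Int)) :
    pvRank4 (pvRank4 gr f) f' = pvRank4 gr f' := by
  unfold pvRank4
  exact pv_abs4 gr _ _ _ _ _ _ _ _

-- A's inner loop: the last iteration's sort-and-assign wins, over the fully updated dict
lemma pv_inner_eq (l : List (String × List Int)) (hne : l ≠ [])
    (gr : PySem.Dict String String) (f3 : PySem.Dict String (List Int)) :
    l.foldl (fun st2 kv => (pvRank4 st2.1 (pvUpd st2.2 kv), pvUpd st2.2 kv)) (gr, f3)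
      = (pvRank4 gr (l.foldl pvUpd f3), l.foldl pvUpd f3) := by
  induction l generalizing gr f3 with
  | nil => exact absurd rfl hne
  | cons kv rest ih =>
    by_cases hr : rest = []
    · subst hr; simp [List.foldl]
    · simp only [List.foldl_cons]
      rw [ih hr]
      rw [pv_rank4_rank4]

-- the update fold only overwrites existing keys: the items list keeps its length
lemma pv_upd_fold_len (l : List (String × List Int)) (d : PySem.Dict String (List Int))
    (h : ∀ kv ∈ l, d.contains kv.1 = true) :
    (l.foldl pvUpd d).items.length = d.items.length := by
  induction l generalizing d with
  | nil => rfl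
  | cons kv rest ih =>
    simp only [List.foldl_cons]
    rw [ih]
    · show ((d.insert kv.1 _).items).length = d.items.length
      rw [PySem.Dict.items_insert_of_contains _ _ (h kv (by simp))]
      simp
    · intro kv' h'
      show ((d.insert kv.1 _).contains kv'.1) = true
      rw [PySem.Dict.contains_insert]
      simp [h kv' (by simp [h'])]

-- ---- selection = stable descending sort ----

-- pulling an element no later element strictly beats past the whole insertion fold
lemma pv_pull (t : List (String × Int)) (x : String × Int) (acc : List (String × Int))
    (h : ∀ z ∈ t, ¬ x.2 < z.2) :
    t.foldl (fun acc p => PySem.List.insertBy (fun a b => decide (b.2 < a.2)) p acc) (x :: acc)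
      = x :: t.foldl (fun acc p => PySem.List.insertBy (fun a b => decide (b.2 < a.2)) p acc) acc := by
  induction t generalizing acc with
  | nil => rfl
  | cons z t' ih =>
    simp only [List.foldl_cons]
    have hz : (decide (x.2 < z.2)) = false := by simpa using h z (by simp)
    show t'.foldl _ (PySem.List.insertBy _ z (x :: acc)) = _
    rw [show PySem.List.insertBy (fun a b => decide (b.2 < a.2)) z (x :: acc)
          = x :: PySem.List.insertBy (fun a b => decide (b.2 < a.2)) z acc by
        simp [PySem.List.insertBy, hz]]
    rw [ih _ (fun w hw => h w (by simp [hw]))]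

-- the first maximum comes out at the head of the insertion fold
lemma pv_firstmax_fold (t : List (String × Int)) (k : Nat) (acc : List (String × Int))
    (hk : k < t.length)
    (hmax : ∀ z ∈ t, z.2 ≤ (t[k]).2)
    (hfirst : ∀ j (hj : j < k), (t[j]'(by omega)).2 < (t[k]).2)
    (hacc : ∀ a ∈ acc, a.2 < (t[k]).2) :
    t.foldl (fun acc p => PySem.List.insertBy (fun a b => decide (b.2 < a.2)) p acc) acc
      = t[k] :: (t.eraseIdx k).foldl (fun acc p => PySem.List.insertBy (fun a b => decide (b.2 < a.2)) p acc) acc := by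
  induction t generalizing k acc with
  | nil => simp at hk
  | cons y t' ih =>
    cases k with
    | zero =>
      simp only [List.getElem_cons_zero] at hmax hacc ⊢
      simp only [List.eraseIdx_cons_zero, List.foldl_cons]
      have hins : PySem.List.insertBy (fun a b => decide (b.2 < a.2)) y acc = y :: acc := by
        cases acc with
        | nil => rfl
        | cons a acc' =>
          have : (decide (a.2 < y.2)) = true := by simpa using hacc a (by simp)
          simp [PySem.List.insertBy, this]
      rw [hins, pv_pull _ _ _ (fun z hz => not_lt.mpr (hmax z (by simp [hz])))]
    | succ k' =>
      have hk' : k' < t'.length := by simpa using hk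
      simp only [List.getElem_cons_succ] at hmax hfirst hacc ⊢
      simp only [List.eraseIdx_cons_succ, List.foldl_cons]
      refine ih k' _ hk' (fun z hz => hmax z (by simp [hz])) (fun j hj => hfirst (j + 1) (by omega)) ?_
      intro a ha
      rw [PySem.List.mem_insertBy] at ha
      rcases ha with rfl | ha
      · exact hfirst 0 (by omega)
      · exact hacc a ha

-- on the sorted side: stable descending sort pops the first maximum
lemma pv_sorted_pop (t : List (String × Int)) (k : Nat) (hk : k < t.length)
    (hmax : ∀ z ∈ t, z.2 ≤ (t[k]).2)
    (hfirst : ∀ j (hj : j < k), (t[j]'(by omega)).2 < (t[k]).2) :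
    PySem.List.sorted t (fun p => p.2) true
      = t[k] :: PySem.List.sorted (t.eraseIdx k) (fun p => p.2) true := by
  rw [PySem.List.sorted_rev_eq_foldl_insertBy, PySem.List.sorted_rev_eq_foldl_insertBy]
  exact pv_firstmax_fold t k [] hk hmax hfirst (by simp)

-- loop invariant of the best-index scan: it returns the index of the FIRST maximum
lemma pv_best_inv (pool : List (String × Int)) (m : Nat) (h1 : 1 ≤ m) (hm : m ≤ pool.length) :
    ∃ (k : Nat) (hkp : k < pool.length), (PySem.List.pyRange 1 (m : Int)).foldl
        (fun best j => if (PySem.List.pyGetD pool j ("", 0)).2 > (PySem.List.pyGetD pool best ("", 0)).2 then j else best) 0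
        = (k : Int) ∧ k < m ∧
      (∀ j (hj : j < m), (pool[j]'(by omega)).2 ≤ (pool[k]'hkp).2) ∧
      (∀ j (hj : j < k), (pool[j]'(by omega)).2 < (pool[k]'hkp).2) := by
  induction m, h1 using Nat.le_induction with
  | base =>
    refine ⟨0, by omega, ?_, by omega, ?_, by omega⟩
    · have : PySem.List.pyRange 1 ((1 : Nat) : Int) = [] := by
        rw [PySem.List.pyRange_of_pos _ _ (show (0:Int) < 1 by norm_num)]
        norm_num
      rw [this]
      rfl
    · intro j hj; interval_cases j; exact le_refl _
  | succ m hm1 ih =>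
    obtain ⟨k, hkp, hfold, hklt, hmax, hfirst⟩ := ih (by omega)
    have hr : PySem.List.pyRange 1 ((m + 1 : Nat) : Int) = PySem.List.pyRange 1 (m : Int) ++ [(m : Int)] := by
      push_cast
      exact PySem.List.pyRange_one_succ_right (by exact_mod_cast hm1)
    rw [hr, List.foldl_append, hfold]
    simp only [List.foldl_cons, List.foldl_nil]
    have hmlt : m < pool.length := by omega
    have em : PySem.List.pyGetD pool (m : Int) ("", 0) = pool[m] := by
      rw [PySem.List.pyGetD_natCast, List.getD_eq_getElem _ _ hmlt]
    have ek : PySem.List.pyGetD pool (k : Int) ("", 0) = pool[k]'hkp := by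
      rw [PySem.List.pyGetD_natCast, List.getD_eq_getElem _ _ hkp]
    rw [em, ek]
    by_cases hcmp : (pool[m]).2 > (pool[k]'hkp).2
    · refine ⟨m, hmlt, by simp [hcmp], by omega, ?_, ?_⟩
      · intro j hj
        rcases Nat.lt_succ_iff_lt_or_eq.mp hj with hj' | rfl
        · exact le_trans (hmax j hj') (le_of_lt hcmp)
        · exact le_refl _
      · intro j hj
        exact lt_of_le_of_lt (hmax j hj) hcmp
    · refine ⟨k, hkp, by simp [hcmp], by omega, ?_, hfirst⟩
      intro j hj
      rcases Nat.lt_succ_iff_lt_or_eq.mp hj with hj' | rfl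
      · exact hmax j hj'
      · exact not_lt.mp hcmp

-- n selection rounds return the first n names of the stable descending sort
lemma pv_select_sorted (n : Nat) (pool : List (String × Int)) (hn : n ≤ pool.length) :
    pvSelect n pool = ((PySem.List.sorted pool (fun p => p.2) true).take n).map Prod.fst := by
  induction n generalizing pool with
  | zero => simp [pvSelect]
  | succ n ih =>
    obtain ⟨k, hkp, hfold, hklt, hmax, hfirst⟩ := pv_best_inv pool pool.length (by omega) le_rfl
    have hbest : pvBest pool = (k : Int) := by
      unfold pvBest
      rw [PySem.List.len_eq]
      exact hfold
    have hmax' : ∀ z ∈ pool, z.2 ≤ (pool[k]'hkp).2 := by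
      intro z hz
      obtain ⟨j, hj, rfl⟩ := List.mem_iff_getElem.mp hz
      exact hmax j hj
    rw [show pvSelect (n + 1) pool = (pool[k]'hkp).1 :: pvSelect n (pool.eraseIdx k) by
      simp [pvSelect, hbest, PySem.List.pop?_natCast pool k hkp]]
    rw [pv_sorted_pop pool k hkp hmax' hfirst]
    rw [ih _ (by rw [List.length_eraseIdx_of_lt hkp]; omega)]
    simp

-- sorting the (name, score) pool is sorting the items and projecting
lemma pv_insertBy_map (x : String × List Int) (ys : List (String × List Int)) :
    PySem.List.insertBy (fun a b => decide (b.2 < a.2)) (x.1, PySem.List.pyGetD x.2 9 0)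
        (ys.map (fun kv => (kv.1, PySem.List.pyGetD kv.2 9 0)))
      = (PySem.List.insertBy (fun a b => decide (PySem.List.pyGetD b.2 9 0 < PySem.List.pyGetD a.2 9 0)) x ys).map
          (fun kv => (kv.1, PySem.List.pyGetD kv.2 9 0)) := by
  induction ys with
  | nil => rfl
  | cons y ys' ih =>
    simp only [List.map_cons]
    by_cases h : PySem.List.pyGetD y.2 9 0 < PySem.List.pyGetD x.2 9 0 <;>
      simp [PySem.List.insertBy, h, ih]

lemma pv_sorted_map (l : List (String × List Int)) :
    PySem.List.sorted (l.map (fun kv => (kv.1, PySem.List.pyGetD kv.2 9 0))) (fun p => p.2) true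
      = (PySem.List.sorted l (fun it => PySem.List.pyGetD it.2 9 0) true).map
          (fun kv => (kv.1, PySem.List.pyGetD kv.2 9 0)) := by
  rw [PySem.List.sorted_rev_eq_foldl_insertBy, PySem.List.sorted_rev_eq_foldl_insertBy]
  have : ∀ (t : List (String × List Int)) (acc : List (String × List Int)),
      (t.map (fun kv => (kv.1, PySem.List.pyGetD kv.2 9 0))).foldl
          (fun acc p => PySem.List.insertBy (fun a b => decide (b.2 < a.2)) p acc)
          (acc.map (fun kv => (kv.1, PySem.List.pyGetD kv.2 9 0)))
        = (t.foldl (fun acc p => PySem.List.insertBy (fun a b => decide (PySem.List.pyGetD b.2 9 0 < PySem.List.pyGetD a.2 9 0)) p acc) acc).map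
            (fun kv => (kv.1, PySem.List.pyGetD kv.2 9 0)) := by
    intro t
    induction t with
    | nil => intro acc; rfl
    | cons x t' ih =>
      intro acc
      simp only [List.map_cons, List.foldl_cons]
      rw [pv_insertBy_map, ih]
  simpa using this l []

-- A's sort-and-assign equals B's selection-and-assign (on a 6-element third-place dict)
lemma pv_rank_sel (gr : PySem.Dict String String) (f : PySem.Dict String (List Int))
    (h6 : f.items.length = 6) :
    pvRank4 gr f
      = ((((gr.insert "3A/B/C/D" (PySem.List.pyGetD (pvSelect 4 (f.items.map (fun kv => (kv.1, PySem.List.pyGetD kv.2 9 0)))) 0 "")).insert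
            "3A/D/E/F" (PySem.List.pyGetD (pvSelect 4 (f.items.map (fun kv => (kv.1, PySem.List.pyGetD kv.2 9 0)))) 1 "")).insert
            "3D/E/F" (PySem.List.pyGetD (pvSelect 4 (f.items.map (fun kv => (kv.1, PySem.List.pyGetD kv.2 9 0)))) 2 "")).insert
            "3A/B/C" (PySem.List.pyGetD (pvSelect 4 (f.items.map (fun kv => (kv.1, PySem.List.pyGetD kv.2 9 0)))) 3 "")) := by
  have hsel : pvSelect 4 (f.items.map (fun kv => (kv.1, PySem.List.pyGetD kv.2 9 0)))
      = ((PySem.List.sorted f.items (fun it => PySem.List.pyGetD it.2 9 0) true).take 4).map Prod.fst := by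
    rw [pv_select_sorted 4 _ (by simp [h6]), pv_sorted_map]
    rw [← List.map_take, List.map_map]
    rfl
  have hlen : (PySem.List.sorted f.items (fun it => PySem.List.pyGetD it.2 9 0) true).length = 6 := by
    rw [PySem.List.length_sorted, h6]
  unfold pvRank4
  rcases hsrt : PySem.List.sorted f.items (fun it => PySem.List.pyGetD it.2 9 0) true with _ | ⟨a, _ | ⟨b, _ | ⟨c, _ | ⟨d, t⟩⟩⟩⟩ <;>
    rw [hsrt] at hlen <;> simp at hlen
  rw [hsrt] at hsel
  simp only [hsel]
  simp [PySem.List.pyGetD_ofNat']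

-- A's size-6 branch equals B's pvFire
lemma pv_fire_eq (st1 : PySem.Dict String String × PySem.Dict String (List Int)) :
    (if st1.2.size = 6 then
       st1.2.items.foldl (fun st2 kv => (pvRank4 st2.1 (pvUpd st2.2 kv), pvUpd st2.2 kv)) st1
     else st1)
    = pvFire st1 := by
  unfold pvFire
  by_cases h6 : st1.2.size = 6
  · simp only [h6, if_pos]
    have hne : st1.2.items ≠ [] := by
      intro hnil
      have : st1.2.size = 0 := by simp [PySem.Dict.size, hnil]
      omega
    rw [pv_inner_eq st1.2.items hne st1.1 st1.2]
    have hlen : (st1.2.items.foldl pvUpd st1.2).items.length = 6 := by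
      rw [pv_upd_fold_len]
      · exact h6
      · intro kv hkv
        rw [PySem.Dict.contains_iff_mem_keys]
        exact PySem.Dict.mem_keys_of_mem_items _ hkv
    rw [pv_rank_sel _ _ hlen]
  · simp [h6]

-- A's body at index 0 on a 4-block front equals B's chunk step
lemma pv_body0 (w x y z : String × List Int) (rest : List (String × List Int))
    (st : PySem.Dict String String × PySem.Dict String (List Int)) :
    pvBodyA (w :: x :: y :: z :: rest) st 0
      = pvFire
          (if PySem.List.pyGetD w.2 1 0 + PySem.List.pyGetD x.2 1 0 + PySem.List.pyGetD y.2 1 0 + PySem.List.pyGetD z.2 1 0 = 12 then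
            ((st.1.insert (String.ofList ['1', Char.ofNat (PySem.List.pyGetD w.2 0 0 + 64).toNat]) w.1).insert
               (String.ofList ['2', Char.ofNat (PySem.List.pyGetD w.2 0 0 + 64).toNat]) x.1,
             st.2.insert y.1 y.2)
          else st) := by
  unfold pvBodyA
  have e0 : PySem.List.pyGetD (w :: x :: y :: z :: rest) (0 : Int) ("", []) = w := by
    rw [PySem.List.pyGetD_ofNat']; rfl
  have e1 : PySem.List.pyGetD (w :: x :: y :: z :: rest) ((0 : Int) + 1) ("", []) = x := by
    norm_num [PySem.List.pyGetD_ofNat']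
  have e2 : PySem.List.pyGetD (w :: x :: y :: z :: rest) ((0 : Int) + 2) ("", []) = y := by
    norm_num [PySem.List.pyGetD_ofNat']
  have e3 : PySem.List.pyGetD (w :: x :: y :: z :: rest) ((0 : Int) + 3) ("", []) = z := by
    norm_num [PySem.List.pyGetD_ofNat']
  simp only [e0, e1, e2, e3]
  exact pv_fire_eq _

-- stride-4 range over n items (n % 4 ≤ 1): explicit List.range form
lemma pv_range_stride (n : Nat) :
    PySem.List.pyRange 0 ((n : Int) - 1) 4
      = (List.range (((n : Int) + 2) / 4).toNat).map (fun k : Nat => (0 : Int) + 4 * (k : Int)) := by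
  rw [PySem.List.pyRange_of_pos _ _ (show (0:Int) < 4 by norm_num)]
  rw [show (if (0 : Int) < (n : Int) - 1 then (((n : Int) - 1 - 0 + 4 - 1) / 4).toNat else 0)
        = (((n : Int) + 2) / 4).toNat from by split_ifs with h <;> omega]

-- A's body reads only four cells: shifting the list by one block shifts the index by 4
lemma pv_body_shift (w x y z : String × List Int) (rest : List (String × List Int))
    (acc : PySem.Dict String String × PySem.Dict String (List Int)) (k : Nat) :
    pvBodyA (w :: x :: y :: z :: rest) acc ((4 * k + 4 : Nat) : Int)
      = pvBodyA rest acc ((4 * k : Nat) : Int) := by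
  have hg : ∀ (j : Nat), (w :: x :: y :: z :: rest).getD (4 + j) ("", []) = rest.getD j ("", []) := by
    intro j
    rw [show 4 + j = (3 + j) + 1 from by omega, List.getD_cons_succ,
        show 3 + j = (2 + j) + 1 from by omega, List.getD_cons_succ,
        show 2 + j = (1 + j) + 1 from by omega, List.getD_cons_succ,
        show 1 + j = j + 1 from by omega, List.getD_cons_succ]
  unfold pvBodyA
  have e0 : PySem.List.pyGetD (w :: x :: y :: z :: rest) ((4 * k + 4 : Nat) : Int) ("", [])
      = PySem.List.pyGetD rest ((4 * k : Nat) : Int) ("", []) := by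
    rw [PySem.List.pyGetD_natCast, PySem.List.pyGetD_natCast,
        show 4 * k + 4 = 4 + 4 * k from by omega, hg]
  have e1 : PySem.List.pyGetD (w :: x :: y :: z :: rest) (((4 * k + 4 : Nat) : Int) + 1) ("", [])
      = PySem.List.pyGetD rest (((4 * k : Nat) : Int) + 1) ("", []) := by
    rw [show (((4 * k + 4 : Nat) : Int) + 1) = ((4 * k + 5 : Nat) : Int) from by push_cast; ring,
        show (((4 * k : Nat) : Int) + 1) = ((4 * k + 1 : Nat) : Int) from by push_cast; ring,
        PySem.List.pyGetD_natCast, PySem.List.pyGetD_natCast,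
        show 4 * k + 5 = 4 + (4 * k + 1) from by omega, hg]
  have e2 : PySem.List.pyGetD (w :: x :: y :: z :: rest) (((4 * k + 4 : Nat) : Int) + 2) ("", [])
      = PySem.List.pyGetD rest (((4 * k : Nat) : Int) + 2) ("", []) := by
    rw [show (((4 * k + 4 : Nat) : Int) + 2) = ((4 * k + 6 : Nat) : Int) from by push_cast; ring,
        show (((4 * k : Nat) : Int) + 2) = ((4 * k + 2 : Nat) : Int) from by push_cast; ring,
        PySem.List.pyGetD_natCast, PySem.List.pyGetD_natCast,
        show 4 * k + 6 = 4 + (4 * k + 2) from by omega, hg]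
  have e3 : PySem.List.pyGetD (w :: x :: y :: z :: rest) (((4 * k + 4 : Nat) : Int) + 3) ("", [])
      = PySem.List.pyGetD rest (((4 * k : Nat) : Int) + 3) ("", []) := by
    rw [show (((4 * k + 4 : Nat) : Int) + 3) = ((4 * k + 7 : Nat) : Int) from by push_cast; ring,
        show (((4 * k : Nat) : Int) + 3) = ((4 * k + 3 : Nat) : Int) from by push_cast; ring,
        PySem.List.pyGetD_natCast, PySem.List.pyGetD_natCast,
        show 4 * k + 7 = 4 + (4 * k + 3) from by omega, hg]
  rw [e0, e1, e2, e3]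

-- the chunked walk: A's stride-4 index fold is B's four-at-a-time recursion
lemma pv_chunk (N : Nat) : ∀ (g : List (String × List Int)), g.length ≤ N → g.length % 4 ≤ 1 →
    ∀ st, (PySem.List.pyRange 0 (PySem.List.len g - 1) 4).foldl (pvBodyA g) st = pvGoB st g := by
  induction N with
  | zero =>
    intro g hg _ st
    have : g = [] := List.length_eq_zero_iff.mp (by omega)
    subst this
    rw [PySem.List.len_eq]
    rw [show ((([] : List (String × List Int)).length : Int) - 1) = ((0 : Nat) : Int) - 1 from by norm_num,
        pv_range_stride 0]
    rfl
  | succ N ih =>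
    intro g hg h4 st
    rcases g with _ | ⟨w, _ | ⟨x, _ | ⟨y, _ | ⟨z, rest⟩⟩⟩⟩
    · rw [PySem.List.len_eq]
      rw [show ((([] : List (String × List Int)).length : Int) - 1) = ((0 : Nat) : Int) - 1 from by norm_num,
          pv_range_stride 0]
      rfl
    · rw [PySem.List.len_eq]
      rw [show ((([w] : List (String × List Int)).length : Int) - 1) = ((1 : Nat) : Int) - 1 from by norm_num,
          pv_range_stride 1]
      rfl
    · simp at h4
    · simp at h4
    · set m := rest.length with hm
      have hlen : (w :: x :: y :: z :: rest).length = m + 4 := by simp [hm]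
      rw [PySem.List.len_eq, hlen]
      rw [show (((m + 4 : Nat) : Int) - 1) = (((m + 4 : Nat) : Int)) - 1 from rfl, pv_range_stride (m + 4)]
      have hsplit' : (((((m + 4 : Nat) : Int)) + 2) / 4).toNat = ((((m : Nat) : Int) + 2) / 4).toNat + 1 := by
        push_cast
        omega
      rw [hsplit', List.range_succ_eq_map, List.map_cons, List.foldl_cons, List.map_map]
      rw [show pvBodyA (w :: x :: y :: z :: rest) st ((fun k : Nat => (0 : Int) + 4 * (k : Int)) 0)
            = pvBodyA (w :: x :: y :: z :: rest) st 0 from by norm_num]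
      rw [pv_body0]
      rw [show pvGoB st (w :: x :: y :: z :: rest)
            = pvGoB
                (pvFire
                  (if PySem.List.pyGetD w.2 1 0 + PySem.List.pyGetD x.2 1 0 + PySem.List.pyGetD y.2 1 0 + PySem.List.pyGetD z.2 1 0 = 12 then
                    ((st.1.insert (String.ofList ['1', Char.ofNat (PySem.List.pyGetD w.2 0 0 + 64).toNat]) w.1).insert
                       (String.ofList ['2', Char.ofNat (PySem.List.pyGetD w.2 0 0 + 64).toNat]) x.1,
                     st.2.insert y.1 y.2)
                  else st))
                rest from rfl]
      set st2 := pvFire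
        (if PySem.List.pyGetD w.2 1 0 + PySem.List.pyGetD x.2 1 0 + PySem.List.pyGetD y.2 1 0 + PySem.List.pyGetD z.2 1 0 = 12 then
          ((st.1.insert (String.ofList ['1', Char.ofNat (PySem.List.pyGetD w.2 0 0 + 64).toNat]) w.1).insert
             (String.ofList ['2', Char.ofNat (PySem.List.pyGetD w.2 0 0 + 64).toNat]) x.1,
           st.2.insert y.1 y.2)
        else st) with hst2
      rw [← ih rest (by omega) (by omega) st2]
      rw [PySem.List.len_eq, show (((rest.length : Nat) : Int) - 1) = (((m : Nat) : Int)) - 1 from by rw [hm], pv_range_stride m]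
      rw [List.foldl_map, List.foldl_map]
      apply PySem.List.foldl_congr_mem
      intro acc k _
      have c1 : ((fun k : Nat => (0 : Int) + 4 * (k : Int)) ∘ Nat.succ) k = ((4 * k + 4 : Nat) : Int) := by
        simp only [Function.comp_apply]; push_cast; ring
      have c2 : (fun k : Nat => (0 : Int) + 4 * (k : Int)) k = ((4 * k : Nat) : Int) := by
        push_cast; ring
      rw [show pvBodyA (w :: x :: y :: z :: rest) acc (((fun k : Nat => (0 : Int) + 4 * (k : Int)) ∘ Nat.succ) k)
            = pvBodyA (w :: x :: y :: z :: rest) acc ((4 * k + 4 : Nat) : Int) from by rw [c1]]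
      rw [show pvBodyA rest acc ((fun k : Nat => (0 : Int) + 4 * (k : Int)) k) = pvBodyA rest acc ((4 * k : Nat) : Int) from by rw [c2]]
      exact pv_body_shift w x y z rest acc k

-- ===== VERDICT (by name: the statement is the Claim_ definition above) =====
theorem finalists_from_group_spec : Claim_equal_finalists_from_group := by
  intro g _hdom hpre
  unfold Spec_finalists_from_group finalists_from_group finalists_from_group_alt
  exact congrArg (fun st : PySem.Dict String String × PySem.Dict String (List Int) => st.1.items)
    (pv_chunk g.length g le_rfl hpre.1 (PySem.Dict.empty, PySem.Dict.empty))
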